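-- pv_equiv track=rewrite | github.com/empiriker/mwe-detector | mwe_detector/utils.py | find_candidate_matches
-- ===== SOURCE A (Python) =====
-- from collections import defaultdict
-- from itertools import combinations, product
-- from typing import Union
--
-- def find_candidate_matches(
--     lemmas: list[str], token_lemmas: list[str]
-- ) -> list[tuple[int, ...]]:
--     lemma_counts: defaultdict[str, int] = defaultdict(int)
--     for lemma in lemmas:
--         lemma_counts[lemma.lower()] += 1
--
--     drawn: list[Union[list[int], list[tuple[int, ...]]]] = []
--     for lemma, count in lemma_counts.items():
--         matched_tokens = [
--             i for i, tok_lemma in enumerate(token_lemmas) if tok_lemma.lower() == lemma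
--         ]
--         if len(matched_tokens) == 0:
--             return []
--
--         if count > 1:
--             comb = list(combinations(matched_tokens, count))
--             drawn.append(comb)
--         else:
--             drawn.append(matched_tokens)
--
--     candidate_matches: Union[product[tuple[int, ...]], list[tuple[int]]] = (
--         product(*drawn) if len(drawn) > 0 else []
--     )
--
--     match_idxs: list[tuple[int, ...]] = []
--     for tuple_item in candidate_matches:
--         flattened_tuple: list[int] = []
--         for item in tuple_item:
--             if isinstance(item, tuple):
--                 flattened_tuple.extend(item)
--             else:
--                 flattened_tuple.append(item)
--         match_idxs.append(tuple(sorted(flattened_tuple)))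
--
--     return match_idxs
-- ===== SOURCE B (Python) =====
-- def _comb(n, k):
--     """Binomial coefficient C(n, k); 0 when k is out of range."""
--     if k < 0 or n < k:
--         return 0
--     r = 1
--     for i in range(k):
--         r = r * (n - i) // (i + 1)
--     return r
--
--
-- def _unrank(idxs, c, k):
--     """The k-th c-element combination of idxs, in lexicographic order."""
--     res = []
--     i = 0
--     while c > 0:
--         t = _comb(len(idxs) - i - 1, c - 1)
--         if k < t:
--             res.append(idxs[i])
--             c -= 1
--         else:
--             k -= t
--         i += 1
--     return res
--
--
-- def find_candidate_matches(lemmas, token_lemmas):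
--     counts = {}
--     for lemma in lemmas:
--         key = lemma.lower()
--         counts[key] = counts.get(key, 0) + 1
--     if not counts:
--         return []
--     positions = {}
--     for i, tok in enumerate(token_lemmas):
--         positions.setdefault(tok.lower(), []).append(i)
--     groups = []
--     total = 1
--     for key, c in counts.items():
--         idxs = positions.get(key, [])
--         n = _comb(len(idxs), c)
--         if n == 0:
--             return []
--         groups.append((idxs, c, n))
--         total *= n
--     out = []
--     for rank in range(total):
--         rem = rank
--         tup = []
--         for idxs, c, n in reversed(groups):
--             rem, d = divmod(rem, n)
--             tup = _unrank(idxs, c, d) + tup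
--         out.append(tuple(sorted(tup)))
--     return out
-- ===== Notes on version B (the rewrite author's own statement) =====
-- stated objective: alternative
-- what changed: B never materialises per-lemma combination lists or an incremental product: it builds a one-pass lowercased-token index, counts the outputs per distinct lemma with a binomial coefficient, and decodes each output rank 0..total-1 arithmetically (mixed-radix divmod over the groups plus combinadic unranking of each digit), where A generates itertools.combinations per distinct lemma after rescanning token_lemmas and enumerates itertools.product.
import Mathlib
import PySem

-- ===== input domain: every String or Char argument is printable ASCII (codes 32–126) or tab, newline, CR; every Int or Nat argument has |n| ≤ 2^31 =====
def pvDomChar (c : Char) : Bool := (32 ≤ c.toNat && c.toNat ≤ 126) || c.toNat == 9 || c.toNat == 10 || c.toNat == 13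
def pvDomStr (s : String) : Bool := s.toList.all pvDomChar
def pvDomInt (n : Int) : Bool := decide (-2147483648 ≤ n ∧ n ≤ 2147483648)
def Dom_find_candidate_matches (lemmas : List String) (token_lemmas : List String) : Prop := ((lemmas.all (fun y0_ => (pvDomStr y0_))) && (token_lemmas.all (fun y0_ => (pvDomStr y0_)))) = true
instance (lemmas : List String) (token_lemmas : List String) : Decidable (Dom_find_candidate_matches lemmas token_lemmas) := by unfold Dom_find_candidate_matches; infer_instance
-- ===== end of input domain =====

-- B replaces A's generative enumeration (itertools.combinations + itertools.product)
-- by arithmetic: it counts the outputs with binomial coefficients and decodes each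
-- rank 0..total-1 into its tuple by mixed-radix division and combinadic unranking;
-- objective: alternative (different algorithm, similar cost).

-- ===== PORT A =====
-- itertools.combinations(xs, r) over index lists; lexicographic order.
def pyCombinations : Nat → List Int → List (List Int)
  | 0, _ => [[]]
  | _ + 1, [] => []
  | n + 1, x :: xs => (pyCombinations n xs).map (x :: ·) ++ pyCombinations (n + 1) xs

-- A's counting loop: lemma_counts[lemma.lower()] += 1
def countsA (lemmas : List String) : PySem.Dict String Int :=
  lemmas.foldl (fun d l => d.modify (PySem.Str.lower l) 0 (· + 1)) PySem.Dict.empty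

-- A's per-lemma loop building `drawn`, with the early `return []` as `none`.
-- Python's union "int | tuple" entries are encoded uniformly as List Int (an int i as [i]).
def buildDrawnA : List (String × Int) → List String → Option (List (List (List Int)))
  | [], _ => some []
  | (lm, count) :: rest, toks =>
    let matched := (PySem.List.enumerate toks).filterMap
      (fun p => if PySem.Str.lower p.2 == lm then some p.1 else none)
    if matched.length = 0 then none
    else
      let item := if count > 1 then pyCombinations count.toNat matched
                  else matched.map (fun i => [i])
      match buildDrawnA rest toks with
      | none => none
      | some ds => some (item :: ds)

-- itertools.product(*drawn): leftmost factor varies slowest.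
def prodA : List (List (List Int)) → List (List (List Int))
  | [] => [[]]
  | d :: ds => d.flatMap (fun x => (prodA ds).map (x :: ·))

def find_candidate_matches (lemmas : List String) (token_lemmas : List String) : List (List Int) :=
  match buildDrawnA (countsA lemmas).items token_lemmas with
  | none => []
  | some drawn =>
    let candidate_matches := if drawn.length > 0 then prodA drawn else []
    -- flatten = Python's extend/append flattening (ints were encoded as singletons)
    candidate_matches.map (fun t => PySem.List.sorted t.flatten (fun x => x) false)

-- ===== PORT B =====
-- B's _comb(n, k): guarded multiplicative loop, r = r*(n-i)//(i+1) over range(k).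
def pyComb (n k : Int) : Int :=
  if k < 0 || n < k then 0
  else (PySem.List.pyRange 0 k 1).foldl
    (fun r i => PySem.Int.floordiv (r * (n - i)) (i + 1)) 1

-- B's _unrank while loop, advancing i: recursion on the suffix of idxs.
-- (The Python loop indexes idxs[i]; for k < C(len idxs, c) it always stops in time,
-- so the [] case with c > 0 is unreachable at B's call sites.)
def unrankB : List Int → Int → Int → List Int
  | [], _, _ => []
  | x :: rest, c, k =>
    if c ≤ 0 then []
    else
      let t := pyComb rest.length (c - 1)
      if k < t then x :: unrankB rest (c - 1) k
      else unrankB rest c (k - t)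

-- B's counting loop: counts[key] = counts.get(key, 0) + 1
def countsB (lemmas : List String) : PySem.Dict String Int :=
  lemmas.foldl (fun d l => d.insert (PySem.Str.lower l) (d.getD (PySem.Str.lower l) 0 + 1)) PySem.Dict.empty

-- B's one-pass index: positions.setdefault(k, []).append(i)
def indexB (token_lemmas : List String) : PySem.Dict String (List Int) :=
  (PySem.List.enumerate token_lemmas).foldl
    (fun d p => d.modify (PySem.Str.lower p.2) [] (· ++ [p.1])) PySem.Dict.empty

-- B's groups loop (early `return []` as `none`), accumulating groups and total.
def groupsLoopB : List (String × Int) → PySem.Dict String (List Int) →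
    List (List Int × Int × Int) → Int → Option (List (List Int × Int × Int) × Int)
  | [], _, groups, total => some (groups, total)
  | (key, c) :: rest, pos, groups, total =>
    let idxs := pos.getD key []
    let n := pyComb idxs.length c
    if n = 0 then none
    else groupsLoopB rest pos (groups ++ [(idxs, c, n)]) (total * n)

-- B's rank-decoding loop: rem, d = divmod(rem, n); tup = _unrank(idxs, c, d) + tup
def decodeB (groups : List (List Int × Int × Int)) (rank : Int) : List Int :=
  (groups.reverse.foldl
    (fun (st : Int × List Int) g =>
      (PySem.Int.floordiv st.1 g.2.2, unrankB g.1 g.2.1 (PySem.Int.mod st.1 g.2.2) ++ st.2))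
    (rank, [])).2

def find_candidate_matches_alt (lemmas : List String) (token_lemmas : List String) : List (List Int) :=
  let counts := countsB lemmas
  if counts.items = [] then []
  else
    match groupsLoopB counts.items (indexB token_lemmas) [] 1 with
    | none => []
    | some gt =>
      (PySem.List.pyRange 0 gt.2 1).map
        (fun rank => PySem.List.sorted (decodeB gt.1 rank) (fun x => x) false)

-- ===== PRECONDITION & SPEC =====
def Spec_find_candidate_matches (lemmas : List String) (token_lemmas : List String) (out : List (List Int)) : Prop := out = find_candidate_matches_alt lemmas token_lemmas
instance (lemmas : List String) (token_lemmas : List String) (out : List (List Int)) : Decidable (Spec_find_candidate_matches lemmas token_lemmas out) := by unfold Spec_find_candidate_matches; infer_instance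

-- ===== CLAIM (what is proved, stated in full; the proofs are below) =====
def Claim_equal_find_candidate_matches : Prop := ∀ (lemmas : List String) (token_lemmas : List String), Dom_find_candidate_matches lemmas token_lemmas → Spec_find_candidate_matches lemmas token_lemmas (find_candidate_matches lemmas token_lemmas)

-- ===== LEMMAS AND PROOFS =====

-- proof-side clean recursion equivalent to groupsLoopB without the accumulators
def specGroups : List (String × Int) → PySem.Dict String (List Int) →
    Option (List (List Int × Int × Int))
  | [], _ => some []
  | (key, c) :: rest, pos =>
    let idxs := pos.getD key []
    let n := pyComb idxs.length c
    if n = 0 then none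
    else (specGroups rest pos).map ((idxs, c, n) :: ·)

-- B's _comb loop computes the binomial coefficient
theorem comb_fold (n : Nat) : ∀ j : Nat, j ≤ n →
    (List.range j).foldl (fun r (i : Nat) =>
      PySem.Int.floordiv (r * ((n:Int) - (i:Int))) ((i:Int) + 1)) 1 = (Nat.choose n j : Int) := by
  intro j
  induction j with
  | zero => simp
  | succ j ih =>
    intro hj
    rw [List.range_succ, List.foldl_append, ih (by omega)]
    simp only [List.foldl_cons, List.foldl_nil]
    have hsub : (n:Int) - (j:Int) = ((n - j : Nat) : Int) := by omega
    rw [hsub]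
    have h1 : (Nat.choose n j : Int) * ((n - j : Nat) : Int) = ((Nat.choose n j * (n - j) : Nat) : Int) := by
      push_cast; ring
    have h2 : ((j:Int) + 1) = ((j + 1 : Nat) : Int) := by push_cast; ring
    rw [h1, h2, PySem.Int.floordiv_natCast, ← Nat.choose_succ_right_eq,
      Nat.mul_div_cancel _ (by omega)]

theorem pyComb_eq_choose (n k : Nat) :
    pyComb (n : Int) (k : Int) = (Nat.choose n k : Int) := by
  unfold pyComb
  by_cases h : k ≤ n
  · have hc : ((k:Int) < 0 || (n:Int) < (k:Int)) = false := by
      simp only [Bool.or_eq_false_iff, decide_eq_false_iff_not]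
      constructor <;> [omega; exact_mod_cast not_lt.mpr h]
    rw [hc]
    simp only [Bool.false_eq_true, if_false]
    rw [PySem.List.pyRange_zero_natCast, List.foldl_map]
    exact comb_fold n k h
  · have hc : ((k:Int) < 0 || (n:Int) < (k:Int)) = true := by
      simp only [Bool.or_eq_true_iff, decide_eq_true_eq]
      right; exact_mod_cast Nat.lt_of_not_le h
    rw [hc, if_pos rfl, Nat.choose_eq_zero_of_lt (by omega)]
    simp

theorem pyComb_eq_choose' (n : Nat) (c : Int) (hc : 0 ≤ c) :
    pyComb (n : Int) c = (Nat.choose n c.toNat : Int) := by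
  conv_lhs => rw [show c = ((c.toNat : Nat) : Int) from (Int.toNat_of_nonneg hc).symm]
  exact pyComb_eq_choose n c.toNat

-- the number of combinations is the binomial coefficient
theorem length_pyCombinations (c : Nat) (xs : List Int) :
    (pyCombinations c xs).length = Nat.choose xs.length c := by
  induction xs generalizing c with
  | nil => cases c <;> simp [pyCombinations]
  | cons x xs ih =>
    cases c with
    | zero => simp [pyCombinations]
    | succ c => simp [pyCombinations, ih, Nat.choose_succ_succ]

theorem pyCombinations_one (xs : List Int) : pyCombinations 1 xs = xs.map (fun i => [i]) := by
  induction xs with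
  | nil => rfl
  | cons x xs ih => simp [pyCombinations, ih]

-- combinadic unranking: unrankB computes the k-th combination
theorem getElem?_pyCombinations (xs : List Int) (c k : Nat)
    (h : k < Nat.choose xs.length c) :
    (pyCombinations c xs)[k]? = some (unrankB xs (c : Int) (k : Int)) := by
  induction xs generalizing c k with
  | nil =>
    cases c with
    | zero =>
      have : k = 0 := by simpa using h
      subst this; simp [pyCombinations, unrankB]
    | succ c => simp at h
  | cons x rest ih =>
    cases c with
    | zero =>
      have : k = 0 := by simpa using h
      subst this; simp [pyCombinations, unrankB]
    | succ c =>
      have hcpos : ¬((((c:Nat) + 1 : Nat) : Int) ≤ 0) := by push_cast; omega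
      have hc1 : (((c:Nat) + 1 : Nat) : Int) - 1 = (c : Int) := by push_cast; ring
      have hcomb : pyComb (rest.length : Int) (c : Int) = (Nat.choose rest.length c : Int) :=
        pyComb_eq_choose rest.length c
      simp only [pyCombinations]
      by_cases hk : k < Nat.choose rest.length c
      · rw [List.getElem?_append_left (by rw [List.length_map, length_pyCombinations]; exact hk)]
        rw [List.getElem?_map, ih c k hk]
        simp only [Option.map_some]
        rw [unrankB]
        simp only [hcpos, if_false, hc1, hcomb]
        rw [if_pos (by exact_mod_cast hk)]
      · rw [List.getElem?_append_right (by rw [List.length_map, length_pyCombinations]; omega)]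
        rw [List.length_map, length_pyCombinations]
        have hk2 : k - Nat.choose rest.length c < Nat.choose rest.length (c + 1) := by
          have hcc : Nat.choose (rest.length + 1) (c + 1)
              = Nat.choose rest.length c + Nat.choose rest.length (c + 1) :=
            Nat.choose_succ_succ rest.length c
          simp only [List.length_cons] at h
          omega
        rw [ih (c + 1) _ hk2]
        rw [unrankB]
        simp only [hcpos, if_false, hc1, hcomb]
        rw [if_neg (by exact_mod_cast hk)]
        rw [show ((k:Int) - ((Nat.choose rest.length c : Nat) : Int))
            = ((k - Nat.choose rest.length c : Nat) : Int) by omega]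

theorem length_prodA (ds : List (List (List Int))) :
    (prodA ds).length = (ds.map List.length).prod := by
  induction ds with
  | nil => simp [prodA]
  | cons d ds ih => simp [prodA, List.length_flatMap, ih, List.map_const']

theorem length_prodA_cons (d : List (List Int)) (ds : List (List (List Int))) :
    (prodA (d :: ds)).length = d.length * (prodA ds).length := by
  rw [length_prodA, List.map_cons, List.prod_cons, ← length_prodA]

-- indexing into the cartesian product: quotient picks the head, remainder the tail
theorem prodA_cons_getElem? (d : List (List Int)) (ds : List (List (List Int))) (j : Nat)
    (hP : 0 < (prodA ds).length) (hj : j < d.length * (prodA ds).length) :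
    (prodA (d :: ds))[j]? =
      (d[j / (prodA ds).length]?).bind
        (fun x => ((prodA ds)[j % (prodA ds).length]?).map (x :: ·)) := by
  induction d generalizing j with
  | nil => simp at hj
  | cons x d' ih =>
    simp only [prodA, List.flatMap_cons]
    by_cases hj2 : j < (prodA ds).length
    · rw [List.getElem?_append_left (by simp only [List.length_map]; exact hj2)]
      rw [Nat.div_eq_of_lt hj2, Nat.mod_eq_of_lt hj2]
      simp
    · obtain ⟨m, rfl⟩ : ∃ m, j = (prodA ds).length + m := ⟨j - (prodA ds).length, by omega⟩
      rw [List.getElem?_append_right (by simp only [List.length_map]; omega)]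
      simp only [List.length_map]
      have hm : m < d'.length * (prodA ds).length := by
        simp only [List.length_cons] at hj
        nlinarith
      have := ih m hm
      simp only [prodA] at this
      rw [show (prodA ds).length + m - (prodA ds).length = m by omega, this]
      rw [Nat.add_mod_left]
      rw [show ((prodA ds).length + m) / (prodA ds).length = m / (prodA ds).length + 1 by
        rw [Nat.add_comm, Nat.add_div_right _ hP]]
      simp

-- every factor has positive length, so the product list is nonempty
theorem prod_len_pos (gs : List (List Int × Int × Int))
    (hg : ∀ g ∈ gs, 0 ≤ g.2.1 ∧ g.2.2 = (Nat.choose g.1.length g.2.1.toNat : Int) ∧ 0 < g.2.2) :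
    0 < (prodA (gs.map fun g => pyCombinations g.2.1.toNat g.1)).length := by
  rw [length_prodA]
  apply List.prod_pos
  intro a ha
  rw [List.map_map] at ha
  obtain ⟨g, hgmem, rfl⟩ := List.mem_map.mp ha
  simp only [Function.comp_apply]
  rw [length_pyCombinations]
  obtain ⟨_, hn, hpos⟩ := hg g hgmem
  rw [hn] at hpos
  exact_mod_cast hpos

-- B's running total is the number of product tuples
theorem prod_n_eq_len (gs : List (List Int × Int × Int))
    (hg : ∀ g ∈ gs, 0 ≤ g.2.1 ∧ g.2.2 = (Nat.choose g.1.length g.2.1.toNat : Int) ∧ 0 < g.2.2) :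
    (gs.map (fun g => g.2.2)).prod
      = ((prodA (gs.map fun g => pyCombinations g.2.1.toNat g.1)).length : Int) := by
  induction gs with
  | nil => simp [prodA]
  | cons g gs ih =>
    obtain ⟨_, hn, _⟩ := hg g (by simp)
    rw [List.map_cons, List.prod_cons, ih (fun g h => hg g (List.mem_cons_of_mem _ h)),
      List.map_cons, length_prodA_cons, hn, ← length_pyCombinations g.2.1.toNat g.1]
    push_cast; ring

-- the mixed-radix decode fold reconstructs the flattened product element
theorem decode_fold (gs : List (List Int × Int × Int))
    (hg : ∀ g ∈ gs, 0 ≤ g.2.1 ∧ g.2.2 = (Nat.choose g.1.length g.2.1.toNat : Int) ∧ 0 < g.2.2) :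
    ∀ (k : Nat) (acc : List Int) (e : List (List Int)),
      (prodA (gs.map fun g => pyCombinations g.2.1.toNat g.1))[k % (prodA (gs.map fun g => pyCombinations g.2.1.toNat g.1)).length]? = some e →
      gs.reverse.foldl
        (fun (st : Int × List Int) g =>
          (PySem.Int.floordiv st.1 g.2.2, unrankB g.1 g.2.1 (PySem.Int.mod st.1 g.2.2) ++ st.2))
        ((k : Int), acc)
      = (((k / (prodA (gs.map fun g => pyCombinations g.2.1.toNat g.1)).length : Nat) : Int), e.flatten ++ acc) := by
  induction gs with
  | nil =>
    intro k acc e he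
    simp only [List.map_nil, prodA, List.length_cons, List.length_nil, Nat.zero_add,
      Nat.mod_one, List.getElem?_cons_zero, Option.some.injEq] at he
    subst he
    simp [prodA]
  | cons g gs' ih =>
    intro k acc e he
    have hg' : ∀ g ∈ gs', 0 ≤ g.2.1 ∧ g.2.2 = (Nat.choose g.1.length g.2.1.toNat : Int) ∧ 0 < g.2.2 :=
      fun g h => hg g (List.mem_cons_of_mem _ h)
    obtain ⟨hc0, hn, hnpos⟩ := hg g (by simp)
    have hP' : 0 < (prodA (gs'.map fun g => pyCombinations g.2.1.toNat g.1)).length :=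
      prod_len_pos gs' hg'
    set D' := gs'.map fun g => pyCombinations g.2.1.toNat g.1 with hD'
    set P' := (prodA D').length with hPdef
    set Ng := (pyCombinations g.2.1.toNat g.1).length with hNg
    have hNgc : Ng = Nat.choose g.1.length g.2.1.toNat := length_pyCombinations _ _
    have hNgpos : 0 < Ng := by
      rw [hNgc]; rw [hn] at hnpos; exact_mod_cast hnpos
    have hnNg : g.2.2 = (Ng : Int) := by rw [hn, hNgc]
    have hPlen : (prodA (pyCombinations g.2.1.toNat g.1 :: D')).length = Ng * P' :=
      length_prodA_cons _ _
    rw [List.map_cons] at he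
    have hjlt : k % (Ng * P') < Ng * P' := Nat.mod_lt _ (by positivity)
    rw [hPlen] at he
    rw [prodA_cons_getElem? _ _ _ hP' hjlt] at he
    have hdiv : k % (Ng * P') / P' = k / P' % Ng := by
      rw [Nat.mul_comm Ng P']
      exact Nat.mod_mul_right_div_self k P' Ng
    have hmod : k % (Ng * P') % P' = k % P' := Nat.mod_mod_of_dvd k ⟨Ng, Nat.mul_comm Ng P'⟩
    rw [hdiv, hmod] at he
    have hdlt : k / P' % Ng < Nat.choose g.1.length g.2.1.toNat := by
      rw [← hNgc]; exact Nat.mod_lt _ hNgpos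
    rw [getElem?_pyCombinations g.1 _ _ hdlt] at he
    cases hy : (prodA D')[k % P']? with
    | none => rw [hy] at he; simp at he
    | some e'' =>
      rw [hy] at he
      simp only [Option.bind_some, Option.map_some, Option.some.injEq] at he
      rw [List.reverse_cons, List.foldl_append]
      rw [ih hg' k acc e'' hy]
      simp only [List.foldl_cons, List.foldl_nil]
      rw [hnNg]
      rw [PySem.Int.mod_natCast, PySem.Int.floordiv_natCast]
      have hcint : g.2.1 = ((g.2.1.toNat : Nat) : Int) := (Int.toNat_of_nonneg hc0).symm
      subst he
      have hX : (prodA (List.map (fun g => pyCombinations g.2.1.toNat g.1) (g :: gs'))).length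
          = Ng * P' := by rw [List.map_cons]; exact hPlen
      rw [hX, Nat.div_div_eq_div_mul, Nat.mul_comm P' Ng, ← hcint,
        List.flatten_cons, List.append_assoc]

-- accumulator form of B's groups loop
theorem groupsLoopB_eq (items : List (String × Int)) (pos : PySem.Dict String (List Int)) :
    ∀ (acc : List (List Int × Int × Int)) (tot : Int),
    groupsLoopB items pos acc tot =
      (specGroups items pos).map (fun gs => (acc ++ gs, tot * (gs.map (fun g => g.2.2)).prod)) := by
  induction items with
  | nil => intro acc tot; simp [groupsLoopB, specGroups]
  | cons hd rest ih =>
    intro acc tot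
    obtain ⟨key, c⟩ := hd
    simp only [groupsLoopB, specGroups]
    by_cases hn : pyComb ((pos.getD key []).length : Int) c = 0
    · simp [hn]
    · simp only [hn, if_false]
      rw [ih]
      cases specGroups rest pos with
      | none => simp
      | some gs => simp [mul_assoc]

-- correspondence between B's groups and A's drawn factors
theorem groups_drawn (toks : List String) (idx : PySem.Dict String (List Int))
    (hidx : ∀ lm, idx.getD lm [] = (PySem.List.enumerate toks).filterMap
      (fun p => if PySem.Str.lower p.2 == lm then some p.1 else none)) :
    ∀ (items : List (String × Int)), (∀ p ∈ items, 1 ≤ p.2) →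
    match specGroups items idx with
    | some gs =>
        buildDrawnA items toks = some (gs.map fun g => pyCombinations g.2.1.toNat g.1) ∧
        gs.length = items.length ∧
        ∀ g ∈ gs, 0 ≤ g.2.1 ∧ g.2.2 = (Nat.choose g.1.length g.2.1.toNat : Int) ∧ 0 < g.2.2
    | none =>
        match buildDrawnA items toks with
        | none => True
        | some drawn => prodA drawn = [] := by
  intro items
  induction items with
  | nil =>
    intro _
    simp only [specGroups, buildDrawnA]
    exact ⟨rfl, rfl, by simp⟩
  | cons hd rest ih =>
    intro hpos
    obtain ⟨lm, c⟩ := hd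
    have hc1 : (1:Int) ≤ c := hpos (lm, c) (by simp)
    have hcpos : 0 < c.toNat := by omega
    have ihr := ih (fun p hp => hpos p (List.mem_cons_of_mem _ hp))
    simp only [specGroups, buildDrawnA]
    rw [hidx lm]
    set M := (PySem.List.enumerate toks).filterMap
      (fun p => if PySem.Str.lower p.2 == lm then some p.1 else none) with hM
    have hcomb : pyComb (M.length : Int) c = (Nat.choose M.length c.toNat : Int) :=
      pyComb_eq_choose' M.length c (by omega)
    have hitem : (if c > 1 then pyCombinations c.toNat M else M.map (fun i => [i]))
        = pyCombinations c.toNat M := by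
      by_cases h1 : c > 1
      · simp [h1]
      · have : c = 1 := by omega
        simp [this, pyCombinations_one]
    by_cases hM0 : M.length = 0
    · have hz : Nat.choose M.length c.toNat = 0 := by
        rw [hM0]; exact Nat.choose_eq_zero_of_lt hcpos
      have hn0 : pyComb (M.length : Int) c = 0 := by rw [hcomb, hz]; simp
      rw [hn0]
      simp [hM0]
    · by_cases hch : Nat.choose M.length c.toNat = 0
      · have hn0 : pyComb (M.length : Int) c = 0 := by rw [hcomb, hch]; simp
        have hitemnil : pyCombinations c.toNat M = [] :=
          List.length_eq_zero_iff.mp (by rw [length_pyCombinations, hch])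
        simp only [hM0, if_false, hn0, hitem]
        cases hrest : buildDrawnA rest toks with
        | none => simp
        | some ds => simp [prodA, hitemnil]
      · have hne : ¬ (pyComb (M.length : Int) c = 0) := by
          rw [hcomb]; exact_mod_cast hch
        simp only [hM0, if_false, hne, hitem]
        cases hsg : specGroups rest idx with
        | none =>
          rw [hsg] at ihr
          simp only [Option.map_none]
          cases hrest : buildDrawnA rest toks with
          | none => simp
          | some ds =>
            rw [hrest] at ihr
            simp [prodA, ihr]
        | some gs' =>
          rw [hsg] at ihr
          obtain ⟨hbd, hlen, hfacts⟩ := ihr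
          simp only [Option.map_some]
          rw [hbd]
          refine ⟨rfl, by simp [hlen], ?_⟩
          intro g hgmem
          rcases List.mem_cons.mp hgmem with h | h
          · subst h
            refine ⟨show (0:Int) ≤ c by omega, hcomb, ?_⟩
            show (0:Int) < pyComb (M.length : Int) c
            rw [hcomb]
            exact_mod_cast Nat.pos_of_ne_zero hch
          · exact hfacts g h

theorem countsA_eq_counter (lemmas : List String) :
    countsA lemmas = PySem.Dict.counter (lemmas.map PySem.Str.lower) := by
  unfold countsA
  rw [PySem.Dict.counter_eq_foldl, List.foldl_map]

theorem countsB_eq_counter (lemmas : List String) :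
    countsB lemmas = PySem.Dict.counter (lemmas.map PySem.Str.lower) := by
  unfold countsB
  rw [← PySem.Dict.foldl_insert_getD_add_one_eq_counter, List.foldl_map]

-- the two counting loops build the same dict: both are Counter(map lower lemmas)
theorem counts_eq (lemmas : List String) : countsB lemmas = countsA lemmas :=
  (countsB_eq_counter lemmas).trans (countsA_eq_counter lemmas).symm

-- filter-then-project over the (lowered key, index) pairs is A's filterMap scan
theorem filter_map_eq_filterMap (lm : String) : ∀ l : List (Int × String),
    (List.filter (fun p => p.1 == lm) (l.map (fun p => (PySem.Str.lower p.2, p.1)))).map (fun x => x.2)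
      = l.filterMap (fun p => if PySem.Str.lower p.2 == lm then some p.1 else none)
  | [] => rfl
  | q :: l => by
    by_cases hq : PySem.Str.lower q.2 = lm <;>
      simp [hq, filter_map_eq_filterMap lm l]

-- the single-pass index equals A's per-lemma scan, for every lemma
theorem index_getD (toks : List String) (lm : String) :
    (indexB toks).getD lm []
    = (PySem.List.enumerate toks).filterMap
      (fun p => if PySem.Str.lower p.2 == lm then some p.1 else none) := by
  have h : indexB toks
    = ((PySem.List.enumerate toks).map (fun p => (PySem.Str.lower p.2, p.1))).foldl
      (fun d p => d.modify p.1 [] (· ++ [p.2])) PySem.Dict.empty := by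
    unfold indexB
    rw [List.foldl_map]
  rw [h, PySem.Dict.getD_foldl_modify_append]
  rw [PySem.Dict.getD_empty, List.nil_append]
  exact filter_map_eq_filterMap lm (PySem.List.enumerate toks)

theorem countsA_items_pos (lemmas : List String) :
    ∀ p ∈ (countsA lemmas).items, 1 ≤ p.2 := by
  intro p hp
  rw [countsA_eq_counter, PySem.Dict.items_counter] at hp
  obtain ⟨k, hk, rfl⟩ := List.mem_map.mp hp
  have hmem : k ∈ lemmas.map PySem.Str.lower := (PySem.Set.mem_ofList _ _).mp hk
  have : 0 < (lemmas.map PySem.Str.lower).count k := List.count_pos_iff.mpr hmem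
  simp only []
  exact_mod_cast this

-- ===== VERDICT (by name: the statement is the Claim_ definition above) =====
theorem find_candidate_matches_spec : Claim_equal_find_candidate_matches := by
  intro lemmas toks _
  unfold Spec_find_candidate_matches find_candidate_matches find_candidate_matches_alt
  rw [counts_eq]
  have hpos := countsA_items_pos lemmas
  by_cases hnil : (countsA lemmas).items = []
  · simp [hnil, buildDrawnA]
  · simp only [hnil, if_false]
    rw [groupsLoopB_eq]
    have hgd := groups_drawn toks (indexB toks) (index_getD toks) (countsA lemmas).items hpos
    cases hsg : specGroups (countsA lemmas).items (indexB toks) with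
    | none =>
      rw [hsg] at hgd
      simp only [Option.map_none]
      cases hbd : buildDrawnA (countsA lemmas).items toks with
      | none => simp
      | some drawn =>
        rw [hbd] at hgd
        by_cases hl : drawn.length > 0 <;> simp [hl, hgd]
    | some gs =>
      rw [hsg] at hgd
      obtain ⟨hbd, hlen, hfacts⟩ := hgd
      simp only [Option.map_some, List.nil_append, one_mul]
      rw [hbd]
      simp only []
      have hgslen : 0 < gs.length := by
        rw [hlen]; exact List.length_pos_of_ne_nil hnil
      have hdl : 0 < (gs.map fun g => pyCombinations g.2.1.toNat g.1).length := by
        simpa using hgslen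
      rw [if_pos hdl]
      rw [prod_n_eq_len gs hfacts]
      rw [PySem.List.pyRange_zero_natCast, List.map_map]
      apply List.ext_getElem
      · simp
      · intro k h1 h2
        simp only [List.getElem_map, List.getElem_range, Function.comp_apply]
        have hk : k < (prodA (gs.map fun g => pyCombinations g.2.1.toNat g.1)).length := by
          simpa using h1
        have he : (prodA (gs.map fun g => pyCombinations g.2.1.toNat g.1))[k % (prodA (gs.map fun g => pyCombinations g.2.1.toNat g.1)).length]? = some ((prodA (gs.map fun g => pyCombinations g.2.1.toNat g.1))[k]) := by
          rw [Nat.mod_eq_of_lt hk]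
          exact List.getElem?_eq_getElem hk
        unfold decodeB
        rw [decode_fold gs hfacts k [] _ he]
        simp
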